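-- pv_equiv track=rewrite | github.com/jasonxia17/pl-template | questions/DFAs/hw/weighted_balanced_prefix_1/tests/language_definition.py | isInLanguage
-- ===== SOURCE A (Python) =====
-- def isInLanguage(x):
--     i = 0
--     for c in x:
--         if c == '0':
--             i += 1
--         else:
--             i -= 2
--
--         if abs(i) > 1:
--             return False
--
--     return True
-- ===== SOURCE B (Python) =====
-- def isInLanguage(x):
--     # The counter stays in [-1,1] iff exactly the characters whose index is
--     # 1 mod 3 differ from the zero character (the period-3 pattern the DFA
--     # cycles through).
--     return all((c != '0') == (i % 3 == 1) for i, c in enumerate(x))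
-- ===== Notes on version B (the rewrite author's own statement) =====
-- stated objective: alternative
-- what changed: B replaces the running-counter simulation with a closed-form positional characterization: the counter stays within bounds iff every character whose index is 1 mod 3 is a non-zero character and every other character is the zero character, so B just checks each index mod 3 with no accumulator at all.
import Mathlib
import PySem

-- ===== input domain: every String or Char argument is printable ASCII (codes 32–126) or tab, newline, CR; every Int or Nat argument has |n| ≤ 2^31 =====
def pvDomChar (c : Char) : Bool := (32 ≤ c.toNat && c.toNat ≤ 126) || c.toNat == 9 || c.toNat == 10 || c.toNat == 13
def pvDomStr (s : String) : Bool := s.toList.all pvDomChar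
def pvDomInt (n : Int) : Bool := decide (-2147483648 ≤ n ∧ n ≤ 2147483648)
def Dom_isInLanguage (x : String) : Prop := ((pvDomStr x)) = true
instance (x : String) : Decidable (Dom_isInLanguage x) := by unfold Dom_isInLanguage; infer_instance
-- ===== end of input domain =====

-- B replaces A's running-counter simulation with a closed-form positional check:
-- the counter stays in bounds iff exactly the characters at index 1 mod 3 differ
-- from the zero character; same O(n) cost (objective: alternative).


-- ===== PORT A =====
-- the for-loop with early return, as structural recursion over the characters
def isInLanguageLoopA : List Char → Int → Bool
  | [], _ => true
  | c :: cs, i =>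
      let i' : Int := if c = '0' then i + 1 else i - 2
      if 1 < |i'| then false else isInLanguageLoopA cs i'

def isInLanguage (x : String) : Bool := isInLanguageLoopA x.toList 0

-- ===== PORT B =====
-- all((c != '0') == (i % 3 == 1) for i, c in enumerate(x))
def isInLanguage_alt (x : String) : Bool :=
  (PySem.List.enumerate x.toList 0).all
    (fun p => (p.2 != '0') == (PySem.Int.mod p.1 3 == 1))

-- ===== PRECONDITION & SPEC =====
def Spec_isInLanguage (x : String) (out : Bool) : Prop := out = isInLanguage_alt x
instance (x : String) (out : Bool) : Decidable (Spec_isInLanguage x out) := by unfold Spec_isInLanguage; infer_instance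

-- ===== CLAIM =====
def Claim_equal_isInLanguage : Prop := ∀ (x : String), Dom_isInLanguage x → Spec_isInLanguage x (isInLanguage x)

-- ===== LEMMAS AND PROOFS =====
-- A's counter after a valid prefix of length k depends only on k % 3: 0, 1, -1
def pvState (r : Int) : Int := if r = 0 then 0 else if r = 1 then 1 else -1

theorem pvMain (cs : List Char) : ∀ (k : Int), 0 ≤ k →
    isInLanguageLoopA cs (pvState (k % 3)) =
      (PySem.List.enumerate cs k).all
        (fun p => (p.2 != '0') == (PySem.Int.mod p.1 3 == 1)) := by
  induction cs with
  | nil => intro k _; simp [isInLanguageLoopA, PySem.List.enumerate_nil]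
  | cons c cs ih =>
      intro k hk
      rw [PySem.List.enumerate_cons, List.all_cons]
      have hmod : PySem.Int.mod k 3 = k % 3 := PySem.Int.mod_eq_emod_of_pos (by omega)
      have ih' := ih (k + 1) (by omega)
      have hr : k % 3 = 0 ∨ k % 3 = 1 ∨ k % 3 = 2 := by omega
      rcases hr with h | h | h
      · have h1 : (k + 1) % 3 = 1 := by omega
        rw [h1] at ih'
        by_cases hc : c = '0'
        · have hhead : ((c != '0') == (PySem.Int.mod k 3 == 1)) = true := by
            simp [hc, h]
          rw [hhead]; simp only [Bool.true_and]; rw [← ih']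
          norm_num [isInLanguageLoopA, pvState, h, hc]
        · have hhead : ((c != '0') == (PySem.Int.mod k 3 == 1)) = false := by
            simp [hc, h]
          rw [hhead]; simp only [Bool.false_and]
          norm_num [isInLanguageLoopA, pvState, h, hc]
      · have h1 : (k + 1) % 3 = 2 := by omega
        rw [h1] at ih'
        by_cases hc : c = '0'
        · have hhead : ((c != '0') == (PySem.Int.mod k 3 == 1)) = false := by
            simp [hc, h]
          rw [hhead]; simp only [Bool.false_and]
          norm_num [isInLanguageLoopA, pvState, h, hc]
        · have hhead : ((c != '0') == (PySem.Int.mod k 3 == 1)) = true := by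
            simp [hc, h]
          rw [hhead]; simp only [Bool.true_and]; rw [← ih']
          norm_num [isInLanguageLoopA, pvState, h, hc]
      · have h1 : (k + 1) % 3 = 0 := by omega
        rw [h1] at ih'
        by_cases hc : c = '0'
        · have hhead : ((c != '0') == (PySem.Int.mod k 3 == 1)) = true := by
            simp [hc, h]
          rw [hhead]; simp only [Bool.true_and]; rw [← ih']
          norm_num [isInLanguageLoopA, pvState, h, hc]
        · have hhead : ((c != '0') == (PySem.Int.mod k 3 == 1)) = false := by
            simp [hc, h]
          rw [hhead]; simp only [Bool.false_and]
          norm_num [isInLanguageLoopA, pvState, h, hc]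

-- ===== VERDICT =====
theorem isInLanguage_spec : Claim_equal_isInLanguage := by
  intro x _
  unfold Spec_isInLanguage isInLanguage isInLanguage_alt
  have h0 : (0 : Int) = pvState (0 % 3) := by simp [pvState]
  conv_lhs => rw [h0]
  rw [pvMain x.toList 0 le_rfl]
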